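-- pv_equiv track=rewrite | github.com/fpddmw/skills | eco-council-reporting/scripts/eco_council_reporting.py | expand_source_dependencies
-- ===== SOURCE A (Python) =====
-- from typing import Any
--
-- SOURCE_DEPENDENCIES: dict[str, list[str]] = {
--     "youtube-comments-fetch": ["youtube-video-search"],
--     "regulationsgov-comment-detail-fetch": ["regulationsgov-comments-fetch"],
-- }
--
-- def normalize_space(value: str) -> str:
--     return " ".join(str(value).split())
--
-- def maybe_text(value: Any) -> str:
--     if value is None:
--         return ""
--     return normalize_space(str(value))
--
-- def unique_strings(values: list[str]) -> list[str]:
--     seen: set[str] = set()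
--     result: list[str] = []
--     for value in values:
--         text = maybe_text(value)
--         if not text or text in seen:
--             continue
--         seen.add(text)
--         result.append(text)
--     return result
--
-- def expand_source_dependencies(sources: list[str]) -> list[str]:
--     expanded: list[str] = []
--     visiting: set[str] = set()
--
--     def visit(source: str) -> None:
--         text = maybe_text(source)
--         if not text or text in visiting:
--             return
--         visiting.add(text)
--         for dependency in SOURCE_DEPENDENCIES.get(text, []):
--             visit(dependency)
--         expanded.append(text)
--         visiting.remove(text)
--
--     for source in unique_strings(sources):
--         visit(source)
--     return unique_strings(expanded)
-- ===== SOURCE B (Python) =====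
-- SOURCE_DEPENDENCIES: dict[str, list[str]] = {
--     "youtube-comments-fetch": ["youtube-video-search"],
--     "regulationsgov-comment-detail-fetch": ["regulationsgov-comments-fetch"],
-- }
--
-- def expand_source_dependencies(sources: list[str]) -> list[str]:
--     # Single pass with one first-occurrence dedup: the fixed dependency table is
--     # one-level (no dependency is itself a key), so each source contributes its
--     # prerequisites followed by itself.
--     seen: set[str] = set()
--     out: list[str] = []
--     for source in sources:
--         text = " ".join(str(source).split())
--         if not text:
--             continue
--         for item in SOURCE_DEPENDENCIES.get(text, []) + [text]:
--             if item not in seen: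
--                 seen.add(item)
--                 out.append(item)
--     return out
-- ===== Notes on version B (the rewrite author's own statement) =====
-- stated objective: simpler
-- what changed: Replaces the per-root recursive visit with its visiting set, plus the three normalize/dedup passes (dedup roots, expand, dedup again), by a single pass over the raw sources that normalizes each source once and emits its table prerequisites then itself through one shared first-occurrence dedup set.
import Mathlib
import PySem

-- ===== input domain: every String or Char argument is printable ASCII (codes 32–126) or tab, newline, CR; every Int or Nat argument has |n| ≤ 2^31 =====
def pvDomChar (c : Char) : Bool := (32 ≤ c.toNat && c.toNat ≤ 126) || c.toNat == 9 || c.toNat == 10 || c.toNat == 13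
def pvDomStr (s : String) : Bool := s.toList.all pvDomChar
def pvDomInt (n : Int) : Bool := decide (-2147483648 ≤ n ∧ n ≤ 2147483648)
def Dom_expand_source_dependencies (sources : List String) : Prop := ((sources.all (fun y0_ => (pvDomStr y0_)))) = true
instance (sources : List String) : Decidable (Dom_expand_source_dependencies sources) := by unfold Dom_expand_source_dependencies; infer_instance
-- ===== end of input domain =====

-- B replaces A's per-root recursive visit (with its visiting set and three normalize/dedup
-- passes) by one pass over the raw sources with a single first-occurrence dedup; same result.

-- ===== PORT A =====
def normalize_space (value : String) : String :=
  PySem.Str.join " " (PySem.Str.split₀ value)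

-- value is always a str here (inputs are List String, the None branch is unreachable)
def maybe_text (value : String) : String :=
  normalize_space value

def SOURCE_DEPENDENCIES : PySem.Dict String (List String) :=
  (PySem.Dict.empty.insert "youtube-comments-fetch" ["youtube-video-search"]).insert
    "regulationsgov-comment-detail-fetch" ["regulationsgov-comments-fetch"]

def unique_strings (values : List String) : List String :=
  (values.foldl
    (fun (st : PySem.Set String × List String) value =>
      let text := maybe_text value
      if text = "" ∨ text ∈ st.1 then st
      else (st.1.add text, st.2 ++ [text]))
    (PySem.Set.ofList [], [])).2

-- A's inner recursive `visit`; state = (expanded, visiting).  The fuel guard only makes the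
-- recursion total: the fixed table has dependency chains of length ≤ 2, so fuel 2 is never
-- exhausted on any input.  `(remove? x).getD` = Python's set.remove (x is always present).
def visit (fuel : Nat) (st : List String × PySem.Set String) (source : String) :
    List String × PySem.Set String :=
  match fuel with
  | 0 => st
  | fuel + 1 =>
    let text := maybe_text source
    if text = "" ∨ text ∈ st.2 then st
    else
      let st1 := (st.1, st.2.add text)
      let st2 := (SOURCE_DEPENDENCIES.getD text []).foldl (visit fuel) st1
      (st2.1 ++ [text], (st2.2.remove? text).getD st2.2)

def expand_source_dependencies (sources : List String) : List String :=
  let st := (unique_strings sources).foldl (visit 2) ([], PySem.Set.ofList [])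
  unique_strings st.1

-- ===== PORT B =====
def expand_source_dependencies_alt (sources : List String) : List String :=
  (sources.foldl
    (fun (st : PySem.Set String × List String) source =>
      let text := PySem.Str.join " " (PySem.Str.split₀ source)
      if text = "" then st
      else
        (SOURCE_DEPENDENCIES.getD text [] ++ [text]).foldl
          (fun st item => if item ∈ st.1 then st else (st.1.add item, st.2 ++ [item])) st)
    (PySem.Set.ofList [], [])).2

-- ===== PRECONDITION & SPEC =====
def Spec_expand_source_dependencies (sources : List String) (out : List String) : Prop := out = expand_source_dependencies_alt sources
instance (sources : List String) (out : List String) : Decidable (Spec_expand_source_dependencies sources out) := by unfold Spec_expand_source_dependencies; infer_instance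

-- ===== CLAIM (what is proved, stated in full; the proofs are below) =====
def Claim_equal_expand_source_dependencies : Prop := ∀ (sources : List String), Dom_expand_source_dependencies sources → Spec_expand_source_dependencies sources (expand_source_dependencies sources)

-- ===== LEMMAS AND PROOFS =====

-- characters of split₀'s words are non-space and words are nonempty -----------------------

def wsfree (w : List Char) : Prop := ∀ c ∈ w, PySem.Chars.isspace c = false
def goodWord (w : List Char) : Prop := w ≠ [] ∧ wsfree w

theorem split₀_go_word (w : List Char) (hw : wsfree w) : ∀ (t cur : List Char) (acc : List (List Char)),
    PySem.Chars.split₀.go (w ++ t) cur acc = PySem.Chars.split₀.go t (w.reverse ++ cur) acc := by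
  induction w with
  | nil => intro t cur acc; simp
  | cons c w ih =>
    intro t cur acc
    have hc : PySem.Chars.isspace c = false := hw c (by simp)
    have hw' : wsfree w := fun d hd => hw d (by simp [hd])
    rw [List.cons_append]
    rw [show PySem.Chars.split₀.go (c :: (w ++ t)) cur acc
        = PySem.Chars.split₀.go (w ++ t) (c :: cur) acc by simp [PySem.Chars.split₀.go, hc]]
    rw [ih hw']
    simp

theorem split₀_go_good (s : List Char) : ∀ cur acc, wsfree cur → (∀ w ∈ acc, goodWord w) →
    ∀ w ∈ PySem.Chars.split₀.go s cur acc, goodWord w := by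
  induction s with
  | nil =>
    intro cur acc hcur hacc w hw
    by_cases hc : cur.isEmpty
    · simp [PySem.Chars.split₀.go, hc] at hw; exact hacc w (by simpa using hw)
    · simp [PySem.Chars.split₀.go, hc] at hw
      rcases (by simpa using hw) with h | h
      · exact hacc w (by simpa using h)
      · subst h
        refine ⟨by simpa [List.isEmpty_iff] using hc, fun d hd => hcur d (by simpa using hd)⟩
  | cons c rest ih =>
    intro cur acc hcur hacc w hw
    by_cases hsp : PySem.Chars.isspace c
    · by_cases hc : cur.isEmpty
      · simp only [PySem.Chars.split₀.go, hsp, if_true, hc] at hw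
        exact ih [] acc (by intro d hd; simp at hd) hacc w hw
      · simp only [PySem.Chars.split₀.go, hsp, if_true, hc, Bool.false_eq_true, if_false] at hw
        refine ih [] _ (by intro d hd; simp at hd) ?_ w hw
        intro v hv
        rcases List.mem_cons.mp hv with h | h
        · subst h
          exact ⟨by simpa [List.isEmpty_iff] using hc, fun d hd => hcur d (by simpa using hd)⟩
        · exact hacc v h
    · simp only [PySem.Chars.split₀.go, hsp, Bool.false_eq_true, if_false] at hw
      refine ih (c :: cur) acc ?_ hacc w hw
      intro d hd
      rcases List.mem_cons.mp hd with h | h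
      · subst h; simpa using hsp
      · exact hcur d h

theorem split₀_good (s : List Char) : ∀ w ∈ PySem.Chars.split₀ s, goodWord w :=
  split₀_go_good s [] [] (by intro d hd; simp at hd) (by intro w hw; simp at hw)

theorem split₀_join (ws : List (List Char)) (h : ∀ w ∈ ws, goodWord w) :
    PySem.Chars.split₀ (PySem.Chars.join [' '] ws) = ws := by
  suffices H : ∀ (ws : List (List Char)) (acc : List (List Char)), (∀ w ∈ ws, goodWord w) →
      PySem.Chars.split₀.go (PySem.Chars.join [' '] ws) [] acc = acc.reverse ++ ws by
    simpa using H ws [] h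
  intro ws
  induction ws with
  | nil => intro acc _; simp [PySem.Chars.join, PySem.Chars.split₀.go, List.intercalate]
  | cons w ws ih =>
    intro acc hgood
    have hw := hgood w (by simp)
    cases ws with
    | nil =>
      have : PySem.Chars.join [' '] [w] = w := by simp [PySem.Chars.join, List.intercalate]
      rw [this]
      rw [show w = w ++ [] by simp, split₀_go_word w hw.2]
      have hne : (w.reverse ++ []).isEmpty = false := by
        simp; exact hw.1
      simp [PySem.Chars.split₀.go, hw.1]
    | cons w2 ws2 =>
      have hjoin : PySem.Chars.join [' '] (w :: w2 :: ws2)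
          = w ++ ' ' :: PySem.Chars.join [' '] (w2 :: ws2) := by
        simp [PySem.Chars.join, List.intercalate]
      rw [hjoin, split₀_go_word w hw.2]
      have hne : (w.reverse ++ ([] : List Char)).isEmpty = false := by
        simp; exact hw.1
      rw [show PySem.Chars.split₀.go (' ' :: PySem.Chars.join [' '] (w2 :: ws2)) (w.reverse ++ []) acc
          = PySem.Chars.split₀.go (PySem.Chars.join [' '] (w2 :: ws2)) [] ((w.reverse ++ []).reverse :: acc) by
        simp [PySem.Chars.split₀.go, hw.1, show PySem.Chars.isspace ' ' = true from by decide]]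
      rw [ih _ (fun v hv => hgood v (by simp [hv]))]
      simp

theorem norm_idem (s : String) : normalize_space (normalize_space s) = normalize_space s := by
  have h : PySem.Str.split₀ (PySem.Str.join " " (PySem.Str.split₀ s)) = PySem.Str.split₀ s := by
    rw [show PySem.Str.split₀ (PySem.Str.join " " (PySem.Str.split₀ s))
        = (PySem.Chars.split₀ ((PySem.Str.join " " (PySem.Str.split₀ s)).toList)).map String.ofList from rfl]
    rw [PySem.Str.toList_join]
    rw [show (" " : String).toList = [' '] from rfl]
    rw [PySem.Str.split₀_map_toList]
    rw [split₀_join _ (split₀_good s.toList)]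
    rfl
  show PySem.Str.join " " (PySem.Str.split₀ (normalize_space s)) = _
  rw [show normalize_space s = PySem.Str.join " " (PySem.Str.split₀ s) from rfl, h]

-- first-occurrence dedup as a pure function ----------------------------------------------

def Ded (s : PySem.Set String) : List String → List String
  | [] => []
  | x :: xs => if x ∈ s then Ded s xs else x :: Ded (s.add x) xs

def nrm (v : String) : String := maybe_text v
def tsOf (values : List String) : List String := (values.map nrm).filter (· ≠ "")
def depsOf (t : String) : List String := SOURCE_DEPENDENCIES.getD t []
def itemOf (t : String) : List String := depsOf t ++ [t]

theorem add_of_mem {s : PySem.Set String} {x : String} (h : x ∈ s) : s.add x = s := by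
  simp [PySem.Set.add, h]

theorem update_of_subset {l : List String} : ∀ {s : PySem.Set String}, (∀ y ∈ l, y ∈ s) →
    s.update l = s := by
  induction l with
  | nil => intro s _; rfl
  | cons x l ih =>
    intro s h
    show (s.add x).update l = s
    rw [add_of_mem (h x (by simp))]
    exact ih (fun y hy => h y (by simp [hy]))

theorem Ded_append (l : List String) : ∀ (s : PySem.Set String) (r : List String),
    Ded s (l ++ r) = Ded s l ++ Ded (s.update l) r := by
  induction l with
  | nil => intro s r; simp [Ded]
  | cons x l ih =>
    intro s r
    show Ded s (x :: (l ++ r)) = Ded s (x :: l) ++ Ded ((s.add x).update l) r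
    by_cases hx : x ∈ s
    · rw [show Ded s (x :: (l ++ r)) = Ded s (l ++ r) by simp [Ded, hx],
        show Ded s (x :: l) = Ded s l by simp [Ded, hx], add_of_mem hx, ih]
    · rw [show Ded s (x :: (l ++ r)) = x :: Ded (s.add x) (l ++ r) by simp [Ded, hx],
        show Ded s (x :: l) = x :: Ded (s.add x) l by simp [Ded, hx], ih]
      simp

theorem Ded_seen {l : List String} : ∀ {s : PySem.Set String}, (∀ y ∈ l, y ∈ s) →
    Ded s l = [] := by
  induction l with
  | nil => intro s _; rfl
  | cons x l ih =>
    intro s h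
    have hx : x ∈ s := h x (by simp)
    rw [show Ded s (x :: l) = Ded s l by simp [Ded, hx]]
    exact ih (fun y hy => h y (by simp [hy]))

theorem mem_of_mem_Ded {l : List String} : ∀ {s : PySem.Set String} {x : String},
    x ∈ Ded s l → x ∈ l := by
  induction l with
  | nil => intro s x h; simp [Ded] at h
  | cons y l ih =>
    intro s x h
    by_cases hy : y ∈ s
    · rw [show Ded s (y :: l) = Ded s l by simp [Ded, hy]] at h
      exact List.mem_cons_of_mem _ (ih h)
    · rw [show Ded s (y :: l) = y :: Ded (s.add y) l by simp [Ded, hy]] at h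
      rcases List.mem_cons.mp h with h | h
      · simp [h]
      · exact List.mem_cons_of_mem _ (ih h)

-- the key dedup-commutation fact: deduplicating the roots first does not change the result
theorem Ded_flatMap_Ded (xs : List String) : ∀ (S s : PySem.Set String),
    (∀ x ∈ S, ∀ y ∈ itemOf x, y ∈ s) →
    Ded s ((Ded S xs).flatMap itemOf) = Ded s (xs.flatMap itemOf) := by
  induction xs with
  | nil => intro S s _; rfl
  | cons x xs ih =>
    intro S s h
    rw [show (x :: xs).flatMap itemOf = itemOf x ++ xs.flatMap itemOf from List.flatMap_cons ..]
    by_cases hx : x ∈ S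
    · rw [show Ded S (x :: xs) = Ded S xs by simp [Ded, hx]]
      rw [Ded_append, Ded_seen (h x hx), update_of_subset (h x hx)]
      rw [List.nil_append]
      exact ih S s h
    · rw [show Ded S (x :: xs) = x :: Ded (S.add x) xs by simp [Ded, hx]]
      rw [show (x :: Ded (S.add x) xs).flatMap itemOf
          = itemOf x ++ (Ded (S.add x) xs).flatMap itemOf from List.flatMap_cons ..]
      rw [Ded_append, Ded_append]
      congr 1
      refine ih (S.add x) (s.update (itemOf x)) ?_
      intro x' hx' y hy
      rw [PySem.Set.mem_update]
      rcases (PySem.Set.mem_add S x x').mp hx' with h' | h'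
      · exact Or.inl (h x' h' y hy)
      · subst h'; exact Or.inr hy

-- characterisations of the two ports ------------------------------------------------------

theorem us_fold (values : List String) : ∀ (s : PySem.Set String) (o : List String), ("" ∈ s → False) →
    values.foldl
      (fun (st : PySem.Set String × List String) value =>
        let text := maybe_text value
        if text = "" ∨ text ∈ st.1 then st
        else (st.1.add text, st.2 ++ [text])) (s, o)
    = (s.update (tsOf values), o ++ Ded s (tsOf values)) := by
  induction values with
  | nil => intro s o _; simp [tsOf, Ded]
  | cons v values ih =>
    intro s o hs
    rw [List.foldl_cons]
    by_cases hv : maybe_text v = ""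
    · have hts : tsOf (v :: values) = tsOf values := by
        simp [tsOf, nrm, hv]
      simp only [hv, true_or, if_pos, hts]
      exact ih s o hs
    · have hts : tsOf (v :: values) = maybe_text v :: tsOf values := by
        simp [tsOf, nrm, hv]
      by_cases hm : maybe_text v ∈ s
      · simp only [hv, hm, or_true, if_pos, hts]
        rw [ih s o hs]
        rw [show Ded s (maybe_text v :: tsOf values) = Ded s (tsOf values) by simp [Ded, hm]]
        rw [show s.update (maybe_text v :: tsOf values) = (s.add (maybe_text v)).update (tsOf values) from rfl]
        rw [add_of_mem hm]
      · simp only [hv, hm, or_self, if_neg, not_false_eq_true, hts]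
        have hs' : ("" ∈ s.add (maybe_text v) → False) := by
          intro h
          rcases (PySem.Set.mem_add ..).mp h with h | h
          · exact hs h
          · exact hv h.symm
        rw [ih (s.add (maybe_text v)) (o ++ [maybe_text v]) hs']
        rw [show Ded s (maybe_text v :: tsOf values)
            = maybe_text v :: Ded (s.add (maybe_text v)) (tsOf values) by simp [Ded, hm]]
        simp

theorem empty_set_mem (x : String) : x ∈ (PySem.Set.ofList [] : PySem.Set String) → False := by
  intro h
  simp [PySem.Set.ofList, PySem.Set.empty] at h

theorem us_eq (values : List String) :
    unique_strings values = Ded (PySem.Set.ofList []) (tsOf values) := by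
  unfold unique_strings
  rw [us_fold values _ _ (empty_set_mem "")]
  simp

theorem b_inner (l : List String) : ∀ (s : PySem.Set String) (o : List String),
    l.foldl (fun st item => if item ∈ st.1 then st else (st.1.add item, st.2 ++ [item])) (s, o)
    = (s.update l, o ++ Ded s l) := by
  induction l with
  | nil => intro s o; simp [Ded]
  | cons x l ih =>
    intro s o
    rw [List.foldl_cons]
    by_cases hx : x ∈ s
    · simp only [hx, if_pos]
      rw [ih s o, show Ded s (x :: l) = Ded s l by simp [Ded, hx],
        show s.update (x :: l) = (s.add x).update l from rfl, add_of_mem hx]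
    · simp only [hx, if_neg, not_false_eq_true]
      rw [ih (s.add x) (o ++ [x]),
        show Ded s (x :: l) = x :: Ded (s.add x) l by simp [Ded, hx]]
      simp

theorem b_eq (sources : List String) :
    expand_source_dependencies_alt sources
    = Ded (PySem.Set.ofList []) ((tsOf sources).flatMap itemOf) := by
  suffices H : ∀ (src : List String) (s : PySem.Set String) (o : List String),
      src.foldl
        (fun (st : PySem.Set String × List String) source =>
          let text := PySem.Str.join " " (PySem.Str.split₀ source)
          if text = "" then st
          else
            (SOURCE_DEPENDENCIES.getD text [] ++ [text]).foldl
              (fun st item => if item ∈ st.1 then st else (st.1.add item, st.2 ++ [item])) st)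
        (s, o)
      = (s.update ((tsOf src).flatMap itemOf), o ++ Ded s ((tsOf src).flatMap itemOf)) by
    unfold expand_source_dependencies_alt
    rw [H sources (PySem.Set.ofList []) []]
    simp
  intro src
  induction src with
  | nil => intro s o; simp [tsOf, Ded]
  | cons v src ih =>
    intro s o
    rw [List.foldl_cons]
    have hn : PySem.Str.join " " (PySem.Str.split₀ v) = nrm v := rfl
    by_cases hv : nrm v = ""
    · have hts : tsOf (v :: src) = tsOf src := by simp [tsOf, hv]
      simp only [hn, hv, if_pos, hts]
      exact ih s o
    · have hts : tsOf (v :: src) = nrm v :: tsOf src := by simp [tsOf, hv]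
      simp only [hn, hv, if_neg, not_false_eq_true, hts]
      rw [show SOURCE_DEPENDENCIES.getD (nrm v) [] ++ [nrm v] = itemOf (nrm v) from rfl]
      rw [b_inner, ih]
      rw [show (nrm v :: tsOf src).flatMap itemOf = itemOf (nrm v) ++ (tsOf src).flatMap itemOf
          from List.flatMap_cons ..]
      rw [Ded_append, show ∀ (l1 l2 : List String) (t : PySem.Set String),
            t.update (l1 ++ l2) = (t.update l1).update l2 from
          fun l1 l2 t => List.foldl_append]
      simp

-- facts about the fixed dependency table --------------------------------------------------

theorem table_facts (t d : String) (hd : d ∈ depsOf t) :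
    nrm d = d ∧ d ≠ "" ∧ d ≠ t ∧ depsOf d = [] := by
  unfold depsOf SOURCE_DEPENDENCIES at hd
  rw [PySem.Dict.getD_insert, PySem.Dict.getD_insert] at hd
  split_ifs at hd with h1 h2
  · subst h1
    have : d = "regulationsgov-comments-fetch" := by simpa using hd
    subst this
    refine ⟨by decide, by decide, by decide, by decide⟩
  · subst h2
    have : d = "youtube-video-search" := by simpa using hd
    subst this
    refine ⟨by decide, by decide, by decide, by decide⟩
  · simp [PySem.Dict.getD, PySem.Dict.get?, PySem.Dict.empty] at hd

theorem visit_succ (n : Nat) (st : List String × PySem.Set String) (src : String) :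
    visit (n + 1) st src
    = (let text := maybe_text src
       if text = "" ∨ text ∈ st.2 then st
       else
         let st1 := (st.1, st.2.add text)
         let st2 := (SOURCE_DEPENDENCIES.getD text []).foldl (visit n) st1
         (st2.1 ++ [text], (st2.2.remove? text).getD st2.2)) := rfl

theorem visit_dep (t d : String) (hd : d ∈ depsOf t) (e : List String) :
    visit 1 (e, PySem.Set.ofList [t]) d = (e ++ [d], PySem.Set.ofList [t]) := by
  obtain ⟨hnd, hne, hnt, hdeps⟩ := table_facts t d hd
  have hset : (PySem.Set.ofList [t] : PySem.Set String) = [t] := by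
    simp [PySem.Set.ofList, PySem.Set.empty, PySem.Set.add]
  rw [show (1 : Nat) = 0 + 1 from rfl, visit_succ]
  simp only [show maybe_text d = d from hnd]
  rw [if_neg (by
    rintro (h | h)
    · exact hne h
    · rw [hset] at h; exact hnt (by simpa using h))]
  simp only [show SOURCE_DEPENDENCIES.getD d [] = [] from hdeps, List.foldl_nil]
  rw [hset]
  have hadd : PySem.Set.add ([t] : PySem.Set String) d = [t, d] := by
    simp [PySem.Set.add, hnt]
  rw [hadd]
  have hrem : (PySem.Set.remove? ([t, d] : PySem.Set String) d).getD [t, d] = [t] := by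
    simp [PySem.Set.remove?, PySem.Set.discard, Ne.symm hnt]
  rw [hrem]

theorem visit_deps_fold (t : String) (l : List String) (hl : ∀ d ∈ l, d ∈ depsOf t) :
    ∀ (e : List String),
    l.foldl (visit 1) (e, PySem.Set.ofList [t]) = (e ++ l, PySem.Set.ofList [t]) := by
  induction l with
  | nil => intro e; simp
  | cons d l ih =>
    intro e
    rw [List.foldl_cons, visit_dep t d (hl d (by simp))]
    rw [ih (fun d' hd' => hl d' (by simp [hd'])) (e ++ [d])]
    simp

theorem visit_top (e : List String) (src : String) :
    visit 2 (e, PySem.Set.ofList []) src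
    = if nrm src = "" then (e, PySem.Set.ofList [])
      else (e ++ itemOf (nrm src), PySem.Set.ofList []) := by
  rw [show (2 : Nat) = 1 + 1 from rfl, visit_succ]
  simp only [show maybe_text src = nrm src from rfl]
  by_cases hv : nrm src = ""
  · simp only [hv, true_or, if_pos]
  · rw [if_neg hv, if_neg (by
      rintro (h | h)
      · exact hv h
      · simp [PySem.Set.ofList, PySem.Set.empty] at h)]
    have hadd : PySem.Set.add (PySem.Set.ofList ([] : List String)) (nrm src)
        = PySem.Set.ofList [nrm src] := by
      simp [PySem.Set.ofList, PySem.Set.empty, PySem.Set.add]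
    simp only [hadd]
    rw [show SOURCE_DEPENDENCIES.getD (nrm src) [] = depsOf (nrm src) from rfl]
    rw [visit_deps_fold (nrm src) (depsOf (nrm src)) (fun d hd => hd) e]
    have hset : (PySem.Set.ofList [nrm src] : PySem.Set String) = [nrm src] := by
      simp [PySem.Set.ofList, PySem.Set.empty, PySem.Set.add]
    have hrem : (PySem.Set.remove? (PySem.Set.ofList [nrm src]) (nrm src)).getD
        (PySem.Set.ofList [nrm src]) = (PySem.Set.ofList [] : PySem.Set String) := by
      rw [hset]
      simp [PySem.Set.remove?, PySem.Set.discard, PySem.Set.ofList, PySem.Set.empty]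
    simp only [hrem]
    rw [show itemOf (nrm src) = depsOf (nrm src) ++ [nrm src] from rfl]
    simp

theorem a_fold (l : List String) (h : ∀ r ∈ l, nrm r = r ∧ r ≠ "") : ∀ (e : List String),
    l.foldl (visit 2) (e, PySem.Set.ofList [])
    = (e ++ l.flatMap itemOf, PySem.Set.ofList []) := by
  induction l with
  | nil => intro e; simp
  | cons r l ih =>
    intro e
    rw [List.foldl_cons, visit_top, if_neg (by rw [(h r (by simp)).1]; exact (h r (by simp)).2)]
    rw [(h r (by simp)).1]
    rw [ih (fun r' hr' => h r' (by simp [hr']))]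
    simp

theorem tsOf_fixed {l : List String} (h : ∀ x ∈ l, nrm x = x ∧ x ≠ "") : tsOf l = l := by
  unfold tsOf
  rw [List.map_congr_left (fun x hx => (h x hx).1)]
  rw [show List.map (fun x => x) l = l from List.map_id' l]
  exact List.filter_eq_self.mpr (fun x hx => by simpa using (h x hx).2)

theorem a_eq (sources : List String) :
    expand_source_dependencies sources
    = Ded (PySem.Set.ofList []) ((Ded (PySem.Set.ofList []) (tsOf sources)).flatMap itemOf) := by
  have hroot : ∀ r ∈ unique_strings sources, nrm r = r ∧ r ≠ "" := by
    intro r hr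
    rw [us_eq] at hr
    have hr' := mem_of_mem_Ded hr
    unfold tsOf at hr'
    rcases List.mem_filter.mp hr' with ⟨hmem, hne⟩
    rcases List.mem_map.mp hmem with ⟨v, _, rfl⟩
    exact ⟨norm_idem v, by simpa using hne⟩
  have hflat : ∀ x ∈ (unique_strings sources).flatMap itemOf, nrm x = x ∧ x ≠ "" := by
    intro x hx
    rcases List.mem_flatMap.mp hx with ⟨r, hr, hxr⟩
    unfold itemOf at hxr
    rcases List.mem_append.mp hxr with h | h
    · obtain ⟨h1, h2, _, _⟩ := table_facts r x h
      exact ⟨h1, h2⟩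
    · rw [List.mem_singleton.mp h]
      exact hroot r hr
  unfold expand_source_dependencies
  rw [a_fold _ hroot, List.nil_append]
  rw [us_eq ((unique_strings sources).flatMap itemOf)]
  rw [tsOf_fixed hflat]
  rw [us_eq sources]

-- ===== VERDICT (by name: the statement is the Claim_ definition above) =====
theorem expand_source_dependencies_spec : Claim_equal_expand_source_dependencies := by
  intro sources _
  unfold Spec_expand_source_dependencies
  rw [a_eq, b_eq, Ded_flatMap_Ded]
  intro x hx
  simp [PySem.Set.ofList, PySem.Set.empty] at hx
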